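-- pv_equiv track=rewrite | github.com/abdelrahmanbassam/Connect4 | Heuristic/normal_score.py | count_fours
-- ===== SOURCE A (Python) =====
-- def count_fours(board, player):
--     rows, cols = len(board), len(board[0])
--     score = 0
--
--     # ROWS
--     for r in range(rows):
--         count = 0
--         for c in range(cols):
--             if board[r][c] == player:
--                 count += 1
--             else:
--                 score += max(0, count - 3)
--                 count = 0
--         score += max(0, count - 3)
--
--     # COLUMNS
--     for c in range(cols):
--         count = 0
--         for r in range(rows):
--             if board[r][c] == player:
--                 count += 1
--             else:
--                 score += max(0, count - 3)
--                 count = 0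
--         score += max(0, count - 3)
--
--     # DIAGONAL \ (Top-left to bottom-right)
--     for d in range(-rows + 1, cols):
--         count = 0
--         for r in range(rows):
--             c = d + r
--             if 0 <= c < cols:
--                 if board[r][c] == player:
--                     count += 1
--                 else:
--                     score += max(0, count - 3)
--                     count = 0
--         score += max(0, count - 3)
--
--     # DIAGONAL / (Top-right to bottom-left)
--     for d in range(cols + rows - 1):
--         count = 0
--         for r in range(rows):
--             c = d - r
--             if 0 <= c < cols:
--                 if board[r][c] == player:
--                     count += 1
--                 else:
--                     score += max(0, count - 3)
--                     count = 0
--         score += max(0, count - 3)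
--
--     return score
-- ===== SOURCE B (Python) =====
-- def count_fours(board, player):
--     rows, cols = len(board), len(board[0])
--     grid = [row[:cols] for row in board]
--     lines = list(grid)
--     lines += [list(col) for col in zip(*grid)]
--     lines += [[grid[r][d + r] for r in range(rows) if 0 <= d + r < cols]
--               for d in range(-rows + 1, cols)]
--     lines += [[grid[r][d - r] for r in range(rows) if 0 <= d - r < cols]
--               for d in range(cols + rows - 1)]
--     return sum(1 for line in lines
--                for w in zip(line, line[1:], line[2:], line[3:])
--                if all(x == player for x in w))
-- ===== Notes on version B (the rewrite author's own statement) =====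
-- stated objective: simpler
-- what changed: Instead of sweeping each line with a running-run counter and adding max(0,count-3) at every break, B extracts every row/column/diagonal as a list once and counts fully-occupied length-4 sliding windows (zip of four shifted copies), using the identity that a run of length L contains L-3 windows.
import Mathlib
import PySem

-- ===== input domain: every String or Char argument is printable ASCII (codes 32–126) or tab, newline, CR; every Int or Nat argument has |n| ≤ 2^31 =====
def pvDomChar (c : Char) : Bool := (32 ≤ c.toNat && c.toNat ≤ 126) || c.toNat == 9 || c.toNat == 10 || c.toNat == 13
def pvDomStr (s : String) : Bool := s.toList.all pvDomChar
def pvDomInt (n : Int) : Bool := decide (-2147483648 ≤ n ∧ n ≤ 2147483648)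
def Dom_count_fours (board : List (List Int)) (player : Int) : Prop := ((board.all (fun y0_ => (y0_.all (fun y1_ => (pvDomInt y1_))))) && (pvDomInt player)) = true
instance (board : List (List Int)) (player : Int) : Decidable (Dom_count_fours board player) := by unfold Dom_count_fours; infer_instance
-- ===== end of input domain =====

-- B replaces A's running-run counter (adding max(0,count-3) at each break) by extracting each
-- row/column/diagonal as a list and counting fully-occupied length-4 sliding windows: simpler, same cost.

-- ===== PORT A =====
def count_fours (board : List (List Int)) (player : Int) : Int :=
  let rows : Int := PySem.List.len board
  let cols : Int := PySem.List.len (PySem.List.pyGetD board 0 [])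
  -- ROWS
  let s1 := (PySem.List.pyRange 0 rows 1).foldl (fun score r =>
      let q := (PySem.List.pyRange 0 cols 1).foldl (fun (sc : Int × Int) c =>
          if PySem.List.pyGetD (PySem.List.pyGetD board r []) c 0 = player then (sc.1, sc.2 + 1)
          else (sc.1 + max 0 (sc.2 - 3), 0)) (score, 0)
      q.1 + max 0 (q.2 - 3)) 0
  -- COLUMNS
  let s2 := (PySem.List.pyRange 0 cols 1).foldl (fun score c =>
      let q := (PySem.List.pyRange 0 rows 1).foldl (fun (sc : Int × Int) r =>
          if PySem.List.pyGetD (PySem.List.pyGetD board r []) c 0 = player then (sc.1, sc.2 + 1)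
          else (sc.1 + max 0 (sc.2 - 3), 0)) (score, 0)
      q.1 + max 0 (q.2 - 3)) s1
  -- DIAGONAL \
  let s3 := (PySem.List.pyRange (-rows + 1) cols 1).foldl (fun score d =>
      let q := (PySem.List.pyRange 0 rows 1).foldl (fun (sc : Int × Int) r =>
          if 0 ≤ d + r ∧ d + r < cols then
            (if PySem.List.pyGetD (PySem.List.pyGetD board r []) (d + r) 0 = player then (sc.1, sc.2 + 1)
             else (sc.1 + max 0 (sc.2 - 3), 0))
          else sc) (score, 0)
      q.1 + max 0 (q.2 - 3)) s2
  -- DIAGONAL /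
  let s4 := (PySem.List.pyRange 0 (cols + rows - 1) 1).foldl (fun score d =>
      let q := (PySem.List.pyRange 0 rows 1).foldl (fun (sc : Int × Int) r =>
          if 0 ≤ d - r ∧ d - r < cols then
            (if PySem.List.pyGetD (PySem.List.pyGetD board r []) (d - r) 0 = player then (sc.1, sc.2 + 1)
             else (sc.1 + max 0 (sc.2 - 3), 0))
          else sc) (score, 0)
      q.1 + max 0 (q.2 - 3)) s3
  s4

-- ===== PORT B =====
-- number of length-4 all-`p` sliding windows: zip(line, line[1:], line[2:], line[3:])
def pvWin4 (p : Int) : List Int → Int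
  | a :: b :: c :: d :: t =>
      (if a = p ∧ b = p ∧ c = p ∧ d = p then 1 else 0) + pvWin4 p (b :: c :: d :: t)
  | _ => 0
termination_by l => l.length

-- Python's zip(*grid): truncating transpose
def pvZipCols (g : List (List Int)) : List (List Int) :=
  if h : g = [] ∨ g.any (·.isEmpty) then []
  else (g.map (fun row => row.headD 0)) :: pvZipCols (g.map List.tail)
termination_by (g.headD []).length
decreasing_by
  rw [not_or] at h
  obtain ⟨h1, h2⟩ := h
  obtain ⟨r0, rest, rfl⟩ := List.exists_cons_of_ne_nil h1
  have hr0 : r0 ≠ [] := by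
    intro hr; exact h2 (by simp [hr])
  simp only [List.headD_cons]
  cases r0 with
  | nil => exact absurd rfl hr0
  | cons a t => simp

def count_fours_alt (board : List (List Int)) (player : Int) : Int :=
  let rows : Int := PySem.List.len board
  let cols : Int := PySem.List.len (PySem.List.pyGetD board 0 [])
  let grid := board.map (fun row => PySem.List.slice row none (some cols))
  let lines := grid
    ++ pvZipCols grid
    ++ (PySem.List.pyRange (-rows + 1) cols 1).map (fun d =>
         ((PySem.List.pyRange 0 rows 1).filter (fun r => decide (0 ≤ d + r ∧ d + r < cols))).map
           (fun r => PySem.List.pyGetD (PySem.List.pyGetD grid r []) (d + r) 0))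
    ++ (PySem.List.pyRange 0 (cols + rows - 1) 1).map (fun d =>
         ((PySem.List.pyRange 0 rows 1).filter (fun r => decide (0 ≤ d - r ∧ d - r < cols))).map
           (fun r => PySem.List.pyGetD (PySem.List.pyGetD grid r []) (d - r) 0))
  (lines.map (fun line => pvWin4 player line)).sum

-- ===== PRECONDITION & SPEC =====
-- Pre_ is exactly A's domain: A raises IndexError on an empty board (board[0]) and whenever some
-- row is shorter than the first row (board[r][c] for c < cols).
def Pre_count_fours (board : List (List Int)) (player : Int) : Prop :=
  board ≠ [] ∧ ∀ row ∈ board, (board.headD []).length ≤ row.length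
instance (board : List (List Int)) (player : Int) : Decidable (Pre_count_fours board player) := by
  unfold Pre_count_fours; infer_instance

def pvWitness_count_fours : List (List Int) × Int := ([[1, 1, 1, 1, 2], [2, 1, 0, 1, 1]], 1)

def Spec_count_fours (board : List (List Int)) (player : Int) (out : Int) : Prop := out = count_fours_alt board player
instance (board : List (List Int)) (player : Int) (out : Int) : Decidable (Spec_count_fours board player out) := by unfold Spec_count_fours; infer_instance

-- ===== CLAIM (what is proved, stated in full; the proofs are below) =====
def Claim_equal_count_fours : Prop := ∀ (board : List (List Int)) (player : Int), Dom_count_fours board player → Pre_count_fours board player → Spec_count_fours board player (count_fours board player)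

-- ===== LEMMAS AND PROOFS =====

-- A's per-line running count, recursively (count is the Nat c)
def pvG (p : Int) : Nat → List Int → Int
  | c, [] => max 0 ((c : Int) - 3)
  | c, x :: t => if x = p then pvG p (c + 1) t else max 0 ((c : Int) - 3) + pvG p 0 t

theorem pvFoldl_eq_G (p : Int) (l : List Int) (s : Int) (c : Nat) :
    (let q := l.foldl (fun (sc : Int × Int) x =>
        if x = p then (sc.1, sc.2 + 1) else (sc.1 + max 0 (sc.2 - 3), 0)) (s, (c : Int))
     q.1 + max 0 (q.2 - 3)) = s + pvG p c l := by
  induction l generalizing s c with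
  | nil => simp [pvG]
  | cons x t ih =>
    by_cases hx : x = p
    · have hc : ((c : Int) + 1) = ((c + 1 : Nat) : Int) := by push_cast; ring
      simp only [List.foldl_cons, pvG, if_pos hx]
      rw [hc]
      exact ih s (c + 1)
    · simp only [List.foldl_cons, pvG, if_neg hx]
      have := ih (s + max 0 ((c : Int) - 3)) 0
      simp only [Nat.cast_zero] at this
      rw [this]; ring

theorem pvWin4_cons (p a : Int) (t : List Int) :
    pvWin4 p (a :: t) = (if a = p ∧ t.take 3 = [p, p, p] then 1 else 0) + pvWin4 p t := by
  match t with
  | [] => simp [pvWin4]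
  | [b] => simp [pvWin4]
  | [b, c] => simp [pvWin4]
  | b :: c :: d :: t' =>
    rw [pvWin4]
    congr 1
    have ht : (b :: c :: d :: t').take 3 = [b, c, d] := rfl
    rw [ht]
    by_cases h : a = p ∧ b = p ∧ c = p ∧ d = p
    · obtain ⟨h1, h2, h3, h4⟩ := h; simp [h1, h2, h3, h4]
    · rw [if_neg h, if_neg]
      rintro ⟨h1, h2⟩
      simp only [List.cons.injEq, and_true] at h2
      exact h ⟨h1, h2.1, h2.2.1, h2.2.2⟩

theorem pvWin4_replicate (p : Int) (c : Nat) :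
    pvWin4 p (List.replicate c p) = max 0 ((c : Int) - 3) := by
  induction c with
  | zero => simp [pvWin4]
  | succ c ih =>
    rw [List.replicate_succ, pvWin4_cons, ih, List.take_replicate]
    by_cases h3 : 3 ≤ c
    · rw [if_pos]
      · push_cast; omega
      · exact ⟨rfl, by rw [min_eq_left h3]; rfl⟩
    · rw [if_neg]
      · push_cast; omega
      · rintro ⟨-, h⟩
        have := congrArg List.length h
        simp at this; omega

theorem pvWin4_replicate_ne (p x : Int) (hx : x ≠ p) (c : Nat) (t : List Int) :
    pvWin4 p (List.replicate c p ++ x :: t) = max 0 ((c : Int) - 3) + pvWin4 p t := by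
  induction c with
  | zero =>
    rw [List.replicate_zero, List.nil_append, pvWin4_cons, if_neg]
    · push_cast; omega
    · rintro ⟨h, -⟩; exact hx h
  | succ c ih =>
    rw [List.replicate_succ, List.cons_append, pvWin4_cons, ih]
    rw [List.take_append, List.take_replicate, List.length_replicate]
    by_cases h3 : 3 ≤ c
    · rw [if_pos]
      · push_cast; omega
      · refine ⟨rfl, ?_⟩
        rw [min_eq_left h3, Nat.sub_eq_zero_of_le h3, List.take_zero, List.append_nil]; rfl
    · rw [if_neg]
      · push_cast; omega
      · rintro ⟨-, h⟩
        have hxmem : x ∈ List.replicate (min 3 c) p ++ List.take (3 - c) (x :: t) := by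
          have : 0 < 3 - c := by omega
          cases hc : 3 - c with
          | zero => omega
          | succ m => simp [List.take_cons]
        rw [h] at hxmem
        simp only [List.mem_cons, List.not_mem_nil, or_false] at hxmem
        rcases hxmem with h' | h' | h' <;> exact hx h'

theorem pvG_eq_win4 (p : Int) (l : List Int) (c : Nat) :
    pvG p c l = pvWin4 p (List.replicate c p ++ l) := by
  induction l generalizing c with
  | nil => rw [List.append_nil, pvWin4_replicate]; rfl
  | cons x t ih =>
    show (if x = p then pvG p (c + 1) t else _) = _
    by_cases hx : x = p
    · rw [if_pos hx, ih (c + 1), List.replicate_succ', List.append_assoc, hx]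
      rfl
    · rw [if_neg hx, ih 0, List.replicate_zero, List.nil_append,
        pvWin4_replicate_ne p x hx]

theorem pvLineFold (p : Int) (l : List Int) (s : Int) :
    (let q := l.foldl (fun (sc : Int × Int) x =>
        if x = p then (sc.1, sc.2 + 1) else (sc.1 + max 0 (sc.2 - 3), 0)) (s, 0)
     q.1 + max 0 (q.2 - 3)) = s + pvWin4 p l := by
  have := pvFoldl_eq_G p l s 0
  simpa [pvG_eq_win4] using this

theorem pvZipCols_rect (n : Nat) (g : List (List Int)) (hne : g ≠ [])
    (hl : ∀ row ∈ g, row.length = n) :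
    pvZipCols g = (List.range n).map (fun j => g.map (fun row => row.getD j 0)) := by
  induction n generalizing g with
  | zero =>
    obtain ⟨r0, rest, rfl⟩ := List.exists_cons_of_ne_nil hne
    have h0 : r0 = [] := List.eq_nil_of_length_eq_zero (hl r0 (by simp))
    rw [pvZipCols, dif_pos (by right; simp [h0])]
    simp
  | succ n ih =>
    have hnil : ∀ row ∈ g, row ≠ [] := by
      intro row hrow hr
      have := hl row hrow; simp [hr] at this
    rw [pvZipCols, dif_neg, List.range_succ_eq_map, List.map_cons]
    · congr 1
      · apply List.map_congr_left
        intro row hrow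
        obtain ⟨a, t, rfl⟩ := List.exists_cons_of_ne_nil (hnil row hrow)
        simp
      · rw [ih (g.map List.tail)
            (by simpa using hne)
            (by intro row hrow
                simp only [List.mem_map] at hrow
                obtain ⟨row', hrow', rfl⟩ := hrow
                have := hl row' hrow'
                simp [List.length_tail, this]),
          List.map_map]
        apply List.map_congr_left
        intro j hj
        rw [List.map_map]
        apply List.map_congr_left
        intro row hrow
        obtain ⟨a, t, rfl⟩ := List.exists_cons_of_ne_nil (hnil row hrow)
        simp
    · rw [not_or]
      refine ⟨hne, ?_⟩
      simp only [List.any_eq_true, not_exists, not_and]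
      intro row hrow
      simpa using hnil row hrow


theorem pvOuter {γ : Type} (p : Int) (I : List γ) (line : γ → List Int) (init : Int)
    (body : Int → γ → Int)
    (hbody : ∀ (acc : Int), ∀ i ∈ I, body acc i = acc + pvWin4 p (line i)) :
    I.foldl body init = init + (I.map (fun i => pvWin4 p (line i))).sum := by
  rw [PySem.List.foldl_congr_mem I body (fun s i => s + pvWin4 p (line i)) init hbody]
  exact PySem.List.foldl_add I (fun i => pvWin4 p (line i)) init

theorem pvRowMem (board : List (List Int)) (r : Int) (h0 : 0 ≤ r) (h1 : r < (board.length : Int)) :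
    PySem.List.pyGetD board r [] ∈ board := by
  rw [PySem.List.pyGetD_eq_getElem board [] h0 h1]
  exact List.getElem_mem _

theorem pvTakeLine (row : List Int) (n : Nat) (hn : n ≤ row.length) :
    (PySem.List.pyRange 0 (n : Int) 1).map (fun c => PySem.List.pyGetD row c 0) = row.take n := by
  have h := PySem.List.map_pyGetD_pyRange_zero' (row.take n) 0
  rw [List.length_take, min_eq_left hn] at h
  rw [← h]
  apply List.map_congr_left
  intro c hc
  rw [PySem.List.mem_pyRange_one] at hc
  rw [PySem.List.pyGetD_eq_getElem row 0 hc.1 (by omega),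
      PySem.List.pyGetD_eq_getElem (row.take n) 0 hc.1
        (by rw [List.length_take, min_eq_left hn]; omega)]
  exact (List.getElem_take).symm

theorem pvGetTake (row : List Int) (n : Nat) (i : Int) (h0 : 0 ≤ i) (h1 : i < (n : Int))
    (hn : n ≤ row.length) :
    PySem.List.pyGetD (row.take n) i 0 = PySem.List.pyGetD row i 0 := by
  rw [PySem.List.pyGetD_eq_getElem (row.take n) 0 h0
        (by rw [List.length_take, min_eq_left hn]; omega),
      PySem.List.pyGetD_eq_getElem row 0 h0 (by omega)]
  exact List.getElem_take

theorem pvGetDTakeNat (row : List Int) (n j : Nat) (hj : j < n) :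
    (row.take n).getD j 0 = row.getD j 0 := by
  rw [List.getD_eq_getElem?_getD, List.getD_eq_getElem?_getD, List.getElem?_take_of_lt hj]

theorem pvMapRow {β : Type} (board : List (List Int)) (F : List Int → β) :
    (PySem.List.pyRange 0 (board.length : Int) 1).map (fun r => F (PySem.List.pyGetD board r [])) = board.map F := by
  have h := PySem.List.map_pyGetD_pyRange_zero' board []
  conv_rhs => rw [← h]
  rw [List.map_map]
  rfl

theorem pvGridRow (f : List Int → List Int) (board : List (List Int)) (r : Int)
    (h0 : 0 ≤ r) (h1 : r < (board.length : Int)) :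
    PySem.List.pyGetD (board.map f) r [] = f (PySem.List.pyGetD board r []) := by
  rw [PySem.List.pyGetD_eq_getElem (board.map f) [] h0 (by rw [List.length_map]; exact h1),
      PySem.List.pyGetD_eq_getElem board [] h0 h1, List.getElem_map]

-- ===== VERDICT (by name: the statement is the Claim_ definition above) =====
theorem count_fours_spec : Claim_equal_count_fours := by
  intro board player hDom hPre
  obtain ⟨hne, hlen⟩ := hPre
  obtain ⟨r0, rest, rfl⟩ := List.exists_cons_of_ne_nil hne
  have hlen' : ∀ row ∈ r0 :: rest, r0.length ≤ row.length := by
    intro row hrow; simpa using hlen row hrow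
  unfold Spec_count_fours
  simp only [count_fours, count_fours_alt, PySem.List.len_eq, PySem.List.pyGetD_zero_cons]
  have h1 : ∀ (acc : Int), ∀ r ∈ PySem.List.pyRange 0 ((r0 :: rest).length : Int) 1,
      (List.foldl (fun (sc : Int × Int) c => if PySem.List.pyGetD (PySem.List.pyGetD (r0 :: rest) r []) c 0 = player then (sc.1, sc.2 + 1) else (sc.1 + max 0 (sc.2 - 3), 0)) (acc, 0) (PySem.List.pyRange 0 (r0.length : Int) 1)).1 + max 0 ((List.foldl (fun (sc : Int × Int) c => if PySem.List.pyGetD (PySem.List.pyGetD (r0 :: rest) r []) c 0 = player then (sc.1, sc.2 + 1) else (sc.1 + max 0 (sc.2 - 3), 0)) (acc, 0) (PySem.List.pyRange 0 (r0.length : Int) 1)).2 - 3)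
      = acc + pvWin4 player ((PySem.List.pyRange 0 (r0.length : Int) 1).map (fun c => PySem.List.pyGetD (PySem.List.pyGetD (r0 :: rest) r []) c 0)) := by
    intro acc r _
    have hfm : List.foldl (fun (sc : Int × Int) c => if PySem.List.pyGetD (PySem.List.pyGetD (r0 :: rest) r []) c 0 = player then (sc.1, sc.2 + 1) else (sc.1 + max 0 (sc.2 - 3), 0)) (acc, 0) (PySem.List.pyRange 0 (r0.length : Int) 1)
        = List.foldl (fun (sc : Int × Int) x => if x = player then (sc.1, sc.2 + 1) else (sc.1 + max 0 (sc.2 - 3), 0)) (acc, 0) ((PySem.List.pyRange 0 (r0.length : Int) 1).map (fun c => PySem.List.pyGetD (PySem.List.pyGetD (r0 :: rest) r []) c 0)) :=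
      (List.foldl_map (f := fun c => PySem.List.pyGetD (PySem.List.pyGetD (r0 :: rest) r []) c 0) (g := fun (sc : Int × Int) x => if x = player then (sc.1, sc.2 + 1) else (sc.1 + max 0 (sc.2 - 3), 0))).symm
    rw [hfm]
    exact pvLineFold player _ acc
  have h2 : ∀ (acc : Int), ∀ c ∈ PySem.List.pyRange 0 (r0.length : Int) 1,
      (List.foldl (fun (sc : Int × Int) r => if PySem.List.pyGetD (PySem.List.pyGetD (r0 :: rest) r []) c 0 = player then (sc.1, sc.2 + 1) else (sc.1 + max 0 (sc.2 - 3), 0)) (acc, 0) (PySem.List.pyRange 0 ((r0 :: rest).length : Int) 1)).1 + max 0 ((List.foldl (fun (sc : Int × Int) r => if PySem.List.pyGetD (PySem.List.pyGetD (r0 :: rest) r []) c 0 = player then (sc.1, sc.2 + 1) else (sc.1 + max 0 (sc.2 - 3), 0)) (acc, 0) (PySem.List.pyRange 0 ((r0 :: rest).length : Int) 1)).2 - 3)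
      = acc + pvWin4 player ((PySem.List.pyRange 0 ((r0 :: rest).length : Int) 1).map (fun r => PySem.List.pyGetD (PySem.List.pyGetD (r0 :: rest) r []) c 0)) := by
    intro acc c _
    have hfm : List.foldl (fun (sc : Int × Int) r => if PySem.List.pyGetD (PySem.List.pyGetD (r0 :: rest) r []) c 0 = player then (sc.1, sc.2 + 1) else (sc.1 + max 0 (sc.2 - 3), 0)) (acc, 0) (PySem.List.pyRange 0 ((r0 :: rest).length : Int) 1)
        = List.foldl (fun (sc : Int × Int) x => if x = player then (sc.1, sc.2 + 1) else (sc.1 + max 0 (sc.2 - 3), 0)) (acc, 0) ((PySem.List.pyRange 0 ((r0 :: rest).length : Int) 1).map (fun r => PySem.List.pyGetD (PySem.List.pyGetD (r0 :: rest) r []) c 0)) :=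
      (List.foldl_map (f := fun r => PySem.List.pyGetD (PySem.List.pyGetD (r0 :: rest) r []) c 0) (g := fun (sc : Int × Int) x => if x = player then (sc.1, sc.2 + 1) else (sc.1 + max 0 (sc.2 - 3), 0))).symm
    rw [hfm]
    exact pvLineFold player _ acc
  have h3 : ∀ (acc : Int), ∀ d ∈ PySem.List.pyRange (-((r0 :: rest).length : Int) + 1) (r0.length : Int) 1,
      (List.foldl (fun (sc : Int × Int) r => if 0 ≤ d + r ∧ d + r < (r0.length : Int) then (if PySem.List.pyGetD (PySem.List.pyGetD (r0 :: rest) r []) (d + r) 0 = player then (sc.1, sc.2 + 1) else (sc.1 + max 0 (sc.2 - 3), 0)) else sc) (acc, 0) (PySem.List.pyRange 0 ((r0 :: rest).length : Int) 1)).1 + max 0 ((List.foldl (fun (sc : Int × Int) r => if 0 ≤ d + r ∧ d + r < (r0.length : Int) then (if PySem.List.pyGetD (PySem.List.pyGetD (r0 :: rest) r []) (d + r) 0 = player then (sc.1, sc.2 + 1) else (sc.1 + max 0 (sc.2 - 3), 0)) else sc) (acc, 0) (PySem.List.pyRange 0 ((r0 :: rest).length : Int) 1)).2 - 3)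
      = acc + pvWin4 player (((PySem.List.pyRange 0 ((r0 :: rest).length : Int) 1).filter (fun r => decide (0 ≤ d + r ∧ d + r < (r0.length : Int)))).map (fun r => PySem.List.pyGetD (PySem.List.pyGetD (r0 :: rest) r []) (d + r) 0)) := by
    intro acc d _
    have hflt : List.foldl (fun (sc : Int × Int) r => if 0 ≤ d + r ∧ d + r < (r0.length : Int) then (if PySem.List.pyGetD (PySem.List.pyGetD (r0 :: rest) r []) (d + r) 0 = player then (sc.1, sc.2 + 1) else (sc.1 + max 0 (sc.2 - 3), 0)) else sc) (acc, 0) (PySem.List.pyRange 0 ((r0 :: rest).length : Int) 1) = List.foldl (fun (sc : Int × Int) r => if PySem.List.pyGetD (PySem.List.pyGetD (r0 :: rest) r []) (d + r) 0 = player then (sc.1, sc.2 + 1) else (sc.1 + max 0 (sc.2 - 3), 0)) (acc, 0) ((PySem.List.pyRange 0 ((r0 :: rest).length : Int) 1).filter (fun r => decide (0 ≤ d + r ∧ d + r < (r0.length : Int)))) :=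
      PySem.List.foldl_ite_eq_foldl_filter _ _ _ _
    have hfm : List.foldl (fun (sc : Int × Int) r => if PySem.List.pyGetD (PySem.List.pyGetD (r0 :: rest) r []) (d + r) 0 = player then (sc.1, sc.2 + 1) else (sc.1 + max 0 (sc.2 - 3), 0)) (acc, 0) ((PySem.List.pyRange 0 ((r0 :: rest).length : Int) 1).filter (fun r => decide (0 ≤ d + r ∧ d + r < (r0.length : Int))))
        = List.foldl (fun (sc : Int × Int) x => if x = player then (sc.1, sc.2 + 1) else (sc.1 + max 0 (sc.2 - 3), 0)) (acc, 0) (((PySem.List.pyRange 0 ((r0 :: rest).length : Int) 1).filter (fun r => decide (0 ≤ d + r ∧ d + r < (r0.length : Int)))).map (fun r => PySem.List.pyGetD (PySem.List.pyGetD (r0 :: rest) r []) (d + r) 0)) :=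
      (List.foldl_map (f := fun r => PySem.List.pyGetD (PySem.List.pyGetD (r0 :: rest) r []) (d + r) 0) (g := fun (sc : Int × Int) x => if x = player then (sc.1, sc.2 + 1) else (sc.1 + max 0 (sc.2 - 3), 0))).symm
    rw [hflt, hfm]
    exact pvLineFold player _ acc
  have h4 : ∀ (acc : Int), ∀ d ∈ PySem.List.pyRange 0 ((r0.length : Int) + ((r0 :: rest).length : Int) - 1) 1,
      (List.foldl (fun (sc : Int × Int) r => if 0 ≤ d - r ∧ d - r < (r0.length : Int) then (if PySem.List.pyGetD (PySem.List.pyGetD (r0 :: rest) r []) (d - r) 0 = player then (sc.1, sc.2 + 1) else (sc.1 + max 0 (sc.2 - 3), 0)) else sc) (acc, 0) (PySem.List.pyRange 0 ((r0 :: rest).length : Int) 1)).1 + max 0 ((List.foldl (fun (sc : Int × Int) r => if 0 ≤ d - r ∧ d - r < (r0.length : Int) then (if PySem.List.pyGetD (PySem.List.pyGetD (r0 :: rest) r []) (d - r) 0 = player then (sc.1, sc.2 + 1) else (sc.1 + max 0 (sc.2 - 3), 0)) else sc) (acc, 0) (PySem.List.pyRange 0 ((r0 :: rest).length : Int) 1)).2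 - 3)
      = acc + pvWin4 player (((PySem.List.pyRange 0 ((r0 :: rest).length : Int) 1).filter (fun r => decide (0 ≤ d - r ∧ d - r < (r0.length : Int)))).map (fun r => PySem.List.pyGetD (PySem.List.pyGetD (r0 :: rest) r []) (d - r) 0)) := by
    intro acc d _
    have hflt : List.foldl (fun (sc : Int × Int) r => if 0 ≤ d - r ∧ d - r < (r0.length : Int) then (if PySem.List.pyGetD (PySem.List.pyGetD (r0 :: rest) r []) (d - r) 0 = player then (sc.1, sc.2 + 1) else (sc.1 + max 0 (sc.2 - 3), 0)) else sc) (acc, 0) (PySem.List.pyRange 0 ((r0 :: rest).length : Int) 1) = List.foldl (fun (sc : Int × Int) r => if PySem.List.pyGetD (PySem.List.pyGetD (r0 :: rest) r []) (d - r) 0 = player then (sc.1, sc.2 + 1) else (sc.1 + max 0 (sc.2 - 3), 0)) (acc, 0) ((PySem.List.pyRange 0 ((r0 :: rest).length : Int) 1).filter (fun r => decide (0 ≤ d - r ∧ d - r < (r0.length : Int)))) :=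
      PySem.List.foldl_ite_eq_foldl_filter _ _ _ _
    have hfm : List.foldl (fun (sc : Int × Int) r => if PySem.List.pyGetD (PySem.List.pyGetD (r0 :: rest) r []) (d - r) 0 = player then (sc.1, sc.2 + 1) else (sc.1 + max 0 (sc.2 - 3), 0)) (acc, 0) ((PySem.List.pyRange 0 ((r0 :: rest).length : Int) 1).filter (fun r => decide (0 ≤ d - r ∧ d - r < (r0.length : Int))))
        = List.foldl (fun (sc : Int × Int) x => if x = player then (sc.1, sc.2 + 1) else (sc.1 + max 0 (sc.2 - 3), 0)) (acc, 0) (((PySem.List.pyRange 0 ((r0 :: rest).length : Int) 1).filter (fun r => decide (0 ≤ d - r ∧ d - r < (r0.length : Int)))).map (fun r => PySem.List.pyGetD (PySem.List.pyGetD (r0 :: rest) r []) (d - r) 0)) :=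
      (List.foldl_map (f := fun r => PySem.List.pyGetD (PySem.List.pyGetD (r0 :: rest) r []) (d - r) 0) (g := fun (sc : Int × Int) x => if x = player then (sc.1, sc.2 + 1) else (sc.1 + max 0 (sc.2 - 3), 0))).symm
    rw [hflt, hfm]
    exact pvLineFold player _ acc
  rw [pvOuter player _ _ _ _ h1, pvOuter player _ _ _ _ h2,
      pvOuter player _ _ _ _ h3, pvOuter player _ _ _ _ h4]
  simp only [List.map_append, List.sum_append]
  have hgrow : ∀ row ∈ r0 :: rest, PySem.List.slice row none (some (r0.length : Int)) = row.take r0.length := by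
    intro row _
    rw [PySem.List.slice_to row (Int.natCast_nonneg _), Int.toNat_natCast]
  have LA1 : List.map (fun i => pvWin4 player (List.map (fun c => PySem.List.pyGetD (PySem.List.pyGetD (r0 :: rest) i []) c 0) (PySem.List.pyRange 0 (r0.length : Int) 1))) (PySem.List.pyRange 0 ((r0 :: rest).length : Int) 1)
      = List.map (fun line => pvWin4 player line) (List.map (fun row => PySem.List.slice row none (some (r0.length : Int))) (r0 :: rest)) := by
    rw [List.map_map]
    trans List.map (fun row => pvWin4 player (List.map (fun c => PySem.List.pyGetD row c 0) (PySem.List.pyRange 0 (r0.length : Int) 1))) (r0 :: rest)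
    · exact pvMapRow (r0 :: rest) (fun row => pvWin4 player (List.map (fun c => PySem.List.pyGetD row c 0) (PySem.List.pyRange 0 (r0.length : Int) 1)))
    · apply List.map_congr_left
      intro row hrow
      rw [pvTakeLine row r0.length (hlen' row hrow)]
      simp only [Function.comp_apply]
      rw [hgrow row hrow]
  have hgridlen : ∀ row ∈ List.map (fun row => PySem.List.slice row none (some (r0.length : Int))) (r0 :: rest), row.length = r0.length := by
    intro row hrow
    rw [List.mem_map] at hrow
    obtain ⟨row', h', rfl⟩ := hrow
    rw [hgrow row' h', List.length_take, min_eq_left (hlen' row' h')]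
  have LA2 : List.map (fun i => pvWin4 player (List.map (fun r => PySem.List.pyGetD (PySem.List.pyGetD (r0 :: rest) r []) i 0) (PySem.List.pyRange 0 ((r0 :: rest).length : Int) 1))) (PySem.List.pyRange 0 (r0.length : Int) 1)
      = List.map (fun line => pvWin4 player line) (pvZipCols (List.map (fun row => PySem.List.slice row none (some (r0.length : Int))) (r0 :: rest))) := by
    rw [pvZipCols_rect r0.length _ (by simp) hgridlen, List.map_map,
        PySem.List.pyRange_zero_nat r0.length, List.map_map]
    apply List.map_congr_left
    intro j hj
    have hjn : j < r0.length := List.mem_range.1 hj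
    simp only [Function.comp_apply]
    congr 1
    trans List.map (fun row => PySem.List.pyGetD row ((j : Nat) : Int) 0) (r0 :: rest)
    · exact pvMapRow (r0 :: rest) (fun row => PySem.List.pyGetD row ((j : Nat) : Int) 0)
    · rw [List.map_map]
      apply List.map_congr_left
      intro row hrow
      simp only [Function.comp_apply]
      rw [hgrow row hrow, PySem.List.pyGetD_natCast, pvGetDTakeNat row r0.length j hjn]
  have LA3 : List.map (fun i => pvWin4 player (List.map (fun r => PySem.List.pyGetD (PySem.List.pyGetD (r0 :: rest) r []) (i + r) 0) (List.filter (fun r => decide (0 ≤ i + r ∧ i + r < (r0.length : Int))) (PySem.List.pyRange 0 ((r0 :: rest).length : Int) 1)))) (PySem.List.pyRange (-((r0 :: rest).length : Int) + 1) (r0.length : Int) 1)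
      = List.map (fun line => pvWin4 player line) (List.map (fun d => List.map (fun r => PySem.List.pyGetD (PySem.List.pyGetD (List.map (fun row => PySem.List.slice row none (some (r0.length : Int))) (r0 :: rest)) r []) (d + r) 0) (List.filter (fun r => decide (0 ≤ d + r ∧ d + r < (r0.length : Int))) (PySem.List.pyRange 0 ((r0 :: rest).length : Int) 1))) (PySem.List.pyRange (-((r0 :: rest).length : Int) + 1) (r0.length : Int) 1)) := by
    rw [List.map_map]
    apply List.map_congr_left
    intro d _
    simp only [Function.comp_apply]
    congr 1
    apply List.map_congr_left
    intro r hr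
    rw [List.mem_filter] at hr
    have hr1 := PySem.List.mem_pyRange_one.1 hr.1
    have hcond : 0 ≤ d + r ∧ d + r < (r0.length : Int) := of_decide_eq_true hr.2
    have hrowmem := pvRowMem (r0 :: rest) r hr1.1 hr1.2
    rw [pvGridRow (fun row => PySem.List.slice row none (some (r0.length : Int))) (r0 :: rest) r hr1.1 hr1.2,
        hgrow _ hrowmem,
        pvGetTake (PySem.List.pyGetD (r0 :: rest) r []) r0.length (d + r) hcond.1 hcond.2 (hlen' _ hrowmem)]
  have LA4 : List.map (fun i => pvWin4 player (List.map (fun r => PySem.List.pyGetD (PySem.List.pyGetD (r0 :: rest) r []) (i - r) 0) (List.filter (fun r => decide (0 ≤ i - r ∧ i - r < (r0.length : Int))) (PySem.List.pyRange 0 ((r0 :: rest).length : Int) 1)))) (PySem.List.pyRange 0 ((r0.length : Int) + ((r0 :: rest).length : Int) - 1) 1)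
      = List.map (fun line => pvWin4 player line) (List.map (fun d => List.map (fun r => PySem.List.pyGetD (PySem.List.pyGetD (List.map (fun row => PySem.List.slice row none (some (r0.length : Int))) (r0 :: rest)) r []) (d - r) 0) (List.filter (fun r => decide (0 ≤ d - r ∧ d - r < (r0.length : Int))) (PySem.List.pyRange 0 ((r0 :: rest).length : Int) 1))) (PySem.List.pyRange 0 ((r0.length : Int) + ((r0 :: rest).length : Int) - 1) 1)) := by
    rw [List.map_map]
    apply List.map_congr_left
    intro d _
    simp only [Function.comp_apply]
    congr 1
    apply List.map_congr_left
    intro r hr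
    rw [List.mem_filter] at hr
    have hr1 := PySem.List.mem_pyRange_one.1 hr.1
    have hcond : 0 ≤ d - r ∧ d - r < (r0.length : Int) := of_decide_eq_true hr.2
    have hrowmem := pvRowMem (r0 :: rest) r hr1.1 hr1.2
    rw [pvGridRow (fun row => PySem.List.slice row none (some (r0.length : Int))) (r0 :: rest) r hr1.1 hr1.2,
        hgrow _ hrowmem,
        pvGetTake (PySem.List.pyGetD (r0 :: rest) r []) r0.length (d - r) hcond.1 hcond.2 (hlen' _ hrowmem)]
  rw [LA1, LA2, LA3, LA4]
  ring
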